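-- pv_equiv track=rewrite | github.com/Oleksandr-Uvarov/coursematerial_2425 | 07-tuples/17-assignment-empty-seats/student.py | empty_seats
-- ===== SOURCE A (Python) =====
-- def empty_seats(used_seats):
--     if len(used_seats) == 0:
--         return 0
--     if len(used_seats) == 1:
--         return 0
--
--     nr_empty_seats = 0
--     for index in range(0, len(used_seats) - 1):
--         nr_empty_seats += used_seats[index+1] - used_seats[index] - 1
--
--     return nr_empty_seats
-- ===== SOURCE B (Python) =====
-- def empty_seats(used_seats):
--     if not used_seats:
--         return 0
--     return used_seats[-1] - used_seats[0] - (len(used_seats) - 1)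
-- ===== Notes on version B (the rewrite author's own statement) =====
-- stated objective: faster
-- what changed: Replaced the loop summing consecutive gaps with the telescoping closed form last - first - (len-1).
import Mathlib
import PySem

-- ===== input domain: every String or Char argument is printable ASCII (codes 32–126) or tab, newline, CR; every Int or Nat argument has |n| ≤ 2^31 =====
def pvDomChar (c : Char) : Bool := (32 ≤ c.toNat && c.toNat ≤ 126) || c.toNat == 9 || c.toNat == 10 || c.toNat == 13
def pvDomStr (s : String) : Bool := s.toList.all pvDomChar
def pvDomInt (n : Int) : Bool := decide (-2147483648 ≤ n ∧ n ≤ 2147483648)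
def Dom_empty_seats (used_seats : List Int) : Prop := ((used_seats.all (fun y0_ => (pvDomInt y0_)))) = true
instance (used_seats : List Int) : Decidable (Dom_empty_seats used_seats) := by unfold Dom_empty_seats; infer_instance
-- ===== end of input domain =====

-- B replaces A's loop over consecutive gaps with the telescoping closed form last - first - (len-1) (O(1) instead of O(n)).

-- ===== PORT A =====
def empty_seats (used_seats : List Int) : Int :=
  if used_seats.length == 0 then 0
  else if used_seats.length == 1 then 0
  else
    (PySem.List.pyRange 0 ((used_seats.length : Int) - 1) 1).foldl
      (fun acc index =>
        acc + (PySem.List.pyGetD used_seats (index + 1) 0 - PySem.List.pyGetD used_seats index 0 - 1))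
      0

-- ===== PORT B =====
def empty_seats_alt (used_seats : List Int) : Int :=
  match used_seats with
  | [] => 0
  | _ :: _ =>
      PySem.List.pyGetD used_seats (-1) 0 - PySem.List.pyGetD used_seats 0 0
        - ((used_seats.length : Int) - 1)

-- ===== PRECONDITION & SPEC =====
def Spec_empty_seats (used_seats : List Int) (out : Int) : Prop := out = empty_seats_alt used_seats
instance (used_seats : List Int) (out : Int) : Decidable (Spec_empty_seats used_seats out) := by unfold Spec_empty_seats; infer_instance

-- ===== CLAIM (what is proved, stated in full; the proofs are below) =====
def Claim_equal_empty_seats : Prop := ∀ (used_seats : List Int), Dom_empty_seats used_seats → Spec_empty_seats used_seats (empty_seats used_seats)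

-- ===== LEMMAS AND PROOFS =====

-- telescoping invariant for A's loop: after summing the first k gaps the accumulator is xs[k] - xs[0] - k
theorem empty_seats_foldl_telescope (xs : List Int) (k : Nat) (hk : k < xs.length) :
    (PySem.List.pyRange 0 (k : Int) 1).foldl
      (fun acc index =>
        acc + (PySem.List.pyGetD xs (index + 1) 0 - PySem.List.pyGetD xs index 0 - 1)) 0
    = PySem.List.pyGetD xs (k : Int) 0 - PySem.List.pyGetD xs 0 0 - k := by
  induction k with
  | zero => simp
  | succ n ih =>
      have hn : n < xs.length := Nat.lt_of_succ_lt hk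
      have hsplit : PySem.List.pyRange 0 ((n : Int) + 1) 1
          = PySem.List.pyRange 0 (n : Int) 1 ++ [(n : Int)] :=
        PySem.List.pyRange_one_succ_right (by positivity)
      rw [show ((n + 1 : Nat) : Int) = (n : Int) + 1 by push_cast; ring, hsplit,
        List.foldl_append, ih hn]
      simp
      ring

theorem empty_seats_spec' (xs : List Int) : empty_seats xs = empty_seats_alt xs := by
  match xs with
  | [] => rfl
  | [x] =>
      simp [empty_seats, empty_seats_alt,
        PySem.List.pyGetD_neg_one (xs := [x]) (d := 0) (h := by simp)]
  | x :: y :: rest =>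
      have halt : empty_seats_alt (x :: y :: rest)
          = PySem.List.pyGetD (x :: y :: rest) (-1) 0 - PySem.List.pyGetD (x :: y :: rest) 0 0
            - (((x :: y :: rest).length : Int) - 1) := rfl
      rw [halt]
      unfold empty_seats
      have hlen : (x :: y :: rest).length = rest.length + 2 := by simp
      have hk : rest.length + 1 < (x :: y :: rest).length := by simp
      have hcast : ((x :: y :: rest).length : Int) - 1 = ((rest.length + 1 : Nat) : Int) := by
        push_cast [hlen]; ring
      rw [if_neg (by simp), if_neg (by simp [hlen]), hcast,
        empty_seats_foldl_telescope _ _ hk]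
      have hne : (x :: y :: rest) ≠ [] := by simp
      rw [PySem.List.pyGetD_neg_one (d := 0) (h := hne)]
      have hlast : PySem.List.pyGetD (x :: y :: rest) ((rest.length + 1 : Nat) : Int) 0
          = (x :: y :: rest).getLast hne := by
        rw [PySem.List.pyGetD_natCast]
        rw [List.getLast_eq_getElem]
        simp [List.getD, hlen]
      rw [hlast]

-- ===== VERDICT (by name: the statement is the Claim_ definition above) =====
theorem empty_seats_spec : Claim_equal_empty_seats := by
  intro xs _
  exact empty_seats_spec' xs
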